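-- pv_equiv track=rewrite | github.com/mary-lev/fastapi-vercel | data/exercises/understanding/advanced/exercise_29.py | rin
-- ===== SOURCE A (Python) =====
-- def rin(g_name, f_name, idx):
--     result = []
--
--     if len(g_name) > 0:
--         if g_name[0] in f_name:
--             result.append(idx)
--
--         idx = idx + 1
--         result.extend(rin(g_name[1:], f_name, idx))
--
--     return result
-- ===== SOURCE B (Python) =====
-- def rin(g_name, f_name, idx):
--     result = []
--     for i, ch in enumerate(g_name):
--         if ch in f_name:
--             result.append(idx + i)
--     return result
-- ===== Notes on version B (the rewrite author's own statement) =====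
-- stated objective: simpler
-- what changed: Replaces the recursion over string suffixes with an accumulator by a single flat enumerate loop computing each matching index as idx+i.
import Mathlib
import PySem

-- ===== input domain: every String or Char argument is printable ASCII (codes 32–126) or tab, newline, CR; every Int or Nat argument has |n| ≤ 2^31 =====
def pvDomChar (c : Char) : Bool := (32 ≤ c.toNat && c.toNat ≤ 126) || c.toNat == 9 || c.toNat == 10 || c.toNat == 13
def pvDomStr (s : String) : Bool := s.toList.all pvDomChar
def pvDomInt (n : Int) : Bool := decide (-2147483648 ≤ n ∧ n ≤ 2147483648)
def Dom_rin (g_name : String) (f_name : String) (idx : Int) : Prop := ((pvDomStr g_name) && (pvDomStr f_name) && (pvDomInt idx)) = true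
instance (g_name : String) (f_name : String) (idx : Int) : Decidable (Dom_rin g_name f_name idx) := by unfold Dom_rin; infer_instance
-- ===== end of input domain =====

-- B replaces A's recursion over string suffixes (with an incremented accumulator) by one flat enumerate loop; objective: simpler.

-- ===== PORT A =====
-- A recurses on the string: if nonempty, test the head against f_name, then recurse on the tail with idx+1.
def rinAux (g : List Char) (f : List Char) (idx : Int) : List Int :=
  match g with
  | [] => []
  | c :: rest =>
      (if f.contains c then [idx] else []) ++ rinAux rest f (idx + 1)

def rin (g_name : String) (f_name : String) (idx : Int) : List Int :=
  rinAux g_name.toList f_name.toList idx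

-- ===== PORT B =====
-- B: for i, ch in enumerate(g_name): if ch in f_name: result.append(idx + i)
def rin_alt (g_name : String) (f_name : String) (idx : Int) : List Int :=
  (PySem.List.enumerate g_name.toList).foldl
    (fun result p =>
      if f_name.toList.contains p.2 then result ++ [idx + p.1] else result) []

-- ===== PRECONDITION & SPEC =====
def Spec_rin (g_name : String) (f_name : String) (idx : Int) (out : List Int) : Prop := out = rin_alt g_name f_name idx
instance (g_name : String) (f_name : String) (idx : Int) (out : List Int) : Decidable (Spec_rin g_name f_name idx out) := by unfold Spec_rin; infer_instance

-- ===== CLAIM (what is proved, stated in full; the proofs are below) =====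
def Claim_equal_rin : Prop := ∀ (g_name : String) (f_name : String) (idx : Int), Dom_rin g_name f_name idx → Spec_rin g_name f_name idx (rin g_name f_name idx)

-- ===== LEMMAS AND PROOFS =====

-- B's fold over enumerate, with any start offset and any accumulator, equals acc ++ A's recursion.
theorem rinAux_eq_fold (g f : List Char) (idx s : Int) (acc : List Int) :
    (PySem.List.enumerate g s).foldl
      (fun result p => if f.contains p.2 then result ++ [idx + p.1] else result) acc
      = acc ++ rinAux g f (idx + s) := by
  induction g generalizing s acc with
  | nil => simp [PySem.List.enumerate_nil, rinAux]
  | cons c rest ih =>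
      rw [PySem.List.enumerate_cons]
      simp only [List.foldl_cons, rinAux]
      rw [ih]
      by_cases h : c ∈ f <;> simp [h, List.append_assoc] <;> ring_nf

-- ===== VERDICT (by name: the statement is the Claim_ definition above) =====
theorem rin_spec : Claim_equal_rin := by
  intro g f idx _
  unfold Spec_rin rin rin_alt
  rw [rinAux_eq_fold]
  simp
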